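-- pv_equiv track=rewrite | github.com/elysia090/Lab | E5.py | construct_menger_sponge
-- ===== SOURCE A (Python) =====
-- from itertools import product
--
-- def construct_menger_sponge(iterations):
--     """
--     Construct a 3D Menger sponge up to the specified number of iterations.
--     Returns a list of occupied cube coordinates.
--     Each coordinate is a tuple (x, y, z) representing the position of the cube.
--     """
--     cubes = [(0, 0, 0)]
--     for it in range(iterations):
--         new_cubes = []
--         for (x, y, z) in cubes:
--             # Subdivide the current cube into 27 subcubes
--             for dx, dy, dz in product([0, 1, 2], repeat=3):
--                 # Determine if the subcube should be removed
--                 # Remove the center cube and the centers of each face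
--                 if ((dx == 1 and dy == 1) or
--                     (dx == 1 and dz == 1) or
--                     (dy == 1 and dz == 1)):
--                     continue
--                 new_cubes.append((x * 3 + dx, y * 3 + dy, z * 3 + dz))
--         cubes = new_cubes
--     return cubes
-- ===== SOURCE B (Python) =====
-- from itertools import product
--
-- # The 20 subcube offsets that survive the Menger filter, computed once.
-- _OFFSETS = [(dx, dy, dz) for dx, dy, dz in product([0, 1, 2], repeat=3)
--             if not ((dx == 1 and dy == 1) or
--                     (dx == 1 and dz == 1) or
--                     (dy == 1 and dz == 1))]
--
--
-- def construct_menger_sponge(iterations):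
--     """
--     Construct a 3D Menger sponge up to the specified number of iterations.
--     Returns a list of occupied cube coordinates.
--     Each coordinate is a tuple (x, y, z) representing the position of the cube.
--     """
--     result = []
--     for seq in product(_OFFSETS, repeat=max(iterations, 0)):
--         x = y = z = 0
--         for dx, dy, dz in seq:
--             x, y, z = x * 3 + dx, y * 3 + dy, z * 3 + dz
--         result.append((x, y, z))
--     return result
-- ===== Notes on version B (the rewrite author's own statement) =====
-- stated objective: idiomatic
-- what changed: Instead of repeatedly rebuilding the whole cube list level by level, B precomputes the surviving offset triples once and enumerates itertools.product(offsets, repeat=iterations), folding each digit sequence into a base-3 coordinate; the clamp max(iterations,0) reproduces A's single origin cube on negative input.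
import Mathlib
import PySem

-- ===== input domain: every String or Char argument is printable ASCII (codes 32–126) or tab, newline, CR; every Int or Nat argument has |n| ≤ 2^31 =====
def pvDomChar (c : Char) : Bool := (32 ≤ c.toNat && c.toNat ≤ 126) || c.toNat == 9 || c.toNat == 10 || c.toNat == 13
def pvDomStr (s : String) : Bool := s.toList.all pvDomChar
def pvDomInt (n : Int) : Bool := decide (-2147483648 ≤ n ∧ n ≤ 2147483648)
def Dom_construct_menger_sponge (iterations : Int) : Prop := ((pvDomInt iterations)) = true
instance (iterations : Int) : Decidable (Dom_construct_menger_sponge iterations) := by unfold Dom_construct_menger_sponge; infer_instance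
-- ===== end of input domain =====

-- B precomputes the 20 valid offsets once and enumerates digit sequences with an
-- n-fold product, folding each into a base-3 coordinate (idiomatic; same cost).

-- ===== PORT A =====
-- product([0, 1, 2], repeat=3), in product order (leftmost varies slowest)
def mengerTriples27 : List (Int × Int × Int) :=
  ([0, 1, 2] : List Int).flatMap fun dx =>
    ([0, 1, 2] : List Int).flatMap fun dy =>
      ([0, 1, 2] : List Int).map fun dz => (dx, dy, dz)

def construct_menger_sponge (iterations : Int) : List (Int × Int × Int) :=
  (PySem.List.pyRange 0 iterations 1).foldl
    (fun cubes _it =>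
      cubes.foldl
        (fun new_cubes c =>
          mengerTriples27.foldl
            (fun acc d =>
              if (d.1 = 1 ∧ d.2.1 = 1) ∨ (d.1 = 1 ∧ d.2.2 = 1) ∨ (d.2.1 = 1 ∧ d.2.2 = 1) then
                acc
              else
                acc ++ [(c.1 * 3 + d.1, c.2.1 * 3 + d.2.1, c.2.2 * 3 + d.2.2)])
            new_cubes)
        [])
    [(0, 0, 0)]

-- ===== PORT B =====
-- _OFFSETS: the 20 triples of product([0,1,2], repeat=3) surviving the filter
def spongeOffsets : List (Int × Int × Int) :=
  (([0, 1, 2] : List Int).flatMap fun dx =>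
    ([0, 1, 2] : List Int).flatMap fun dy =>
      ([0, 1, 2] : List Int).map fun dz => (dx, dy, dz)).filter
    fun d =>
      ¬ ((d.1 = 1 ∧ d.2.1 = 1) ∨ (d.1 = 1 ∧ d.2.2 = 1) ∨ (d.2.1 = 1 ∧ d.2.2 = 1))

-- product(spongeOffsets, repeat=n), in product order (leftmost varies slowest)
def spongeSeqs : Nat → List (List (Int × Int × Int))
  | 0 => [[]]
  | n + 1 => spongeOffsets.flatMap fun o => (spongeSeqs n).map (o :: ·)

def construct_menger_sponge_alt (iterations : Int) : List (Int × Int × Int) :=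
  (spongeSeqs (max iterations 0).toNat).map fun s =>
    s.foldl (fun c d => (c.1 * 3 + d.1, c.2.1 * 3 + d.2.1, c.2.2 * 3 + d.2.2)) (0, 0, 0)

-- ===== PRECONDITION & SPEC =====
def Spec_construct_menger_sponge (iterations : Int) (out : List (Int × Int × Int)) : Prop := out = construct_menger_sponge_alt iterations
instance (iterations : Int) (out : List (Int × Int × Int)) : Decidable (Spec_construct_menger_sponge iterations out) := by unfold Spec_construct_menger_sponge; infer_instance

-- ===== CLAIM (what is proved, stated in full; the proofs are below) =====
def Claim_equal_construct_menger_sponge : Prop := ∀ (iterations : Int), Dom_construct_menger_sponge iterations → Spec_construct_menger_sponge iterations (construct_menger_sponge iterations)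

-- ===== LEMMAS AND PROOFS =====
-- the common subdivision step
def spongeStep (c d : Int × Int × Int) : Int × Int × Int :=
  (c.1 * 3 + d.1, c.2.1 * 3 + d.2.1, c.2.2 * 3 + d.2.2)

-- one level of A's subdivision, as a flatMap
def spongeLevel (cs : List (Int × Int × Int)) : List (Int × Int × Int) :=
  cs.flatMap fun c => spongeOffsets.map (spongeStep c)

-- A's inner 27-triple loop over one cube equals appending the 20 stepped offsets
theorem sponge_inner (c : Int × Int × Int) (acc : List (Int × Int × Int)) :
    mengerTriples27.foldl
      (fun acc d =>
        if (d.1 = 1 ∧ d.2.1 = 1) ∨ (d.1 = 1 ∧ d.2.2 = 1) ∨ (d.2.1 = 1 ∧ d.2.2 = 1) then acc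
        else acc ++ [(c.1 * 3 + d.1, c.2.1 * 3 + d.2.1, c.2.2 * 3 + d.2.2)])
      acc = acc ++ spongeOffsets.map (spongeStep c) := by
  simp [mengerTriples27, spongeOffsets, spongeStep, List.foldl, List.filter]

-- A's middle loop over all cubes is one spongeLevel
theorem sponge_middle (cs : List (Int × Int × Int)) :
    cs.foldl
      (fun new_cubes c =>
        mengerTriples27.foldl
          (fun acc d =>
            if (d.1 = 1 ∧ d.2.1 = 1) ∨ (d.1 = 1 ∧ d.2.2 = 1) ∨ (d.2.1 = 1 ∧ d.2.2 = 1) then acc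
            else acc ++ [(c.1 * 3 + d.1, c.2.1 * 3 + d.2.1, c.2.2 * 3 + d.2.2)])
          new_cubes)
      [] = spongeLevel cs := by
  have h : ∀ (cs : List (Int × Int × Int)) (init : List (Int × Int × Int)),
      cs.foldl (fun new_cubes c => new_cubes ++ spongeOffsets.map (spongeStep c)) init
        = init ++ cs.flatMap fun c => spongeOffsets.map (spongeStep c) := by
    intro cs
    induction cs with
    | nil => simp
    | cons c cs ih =>
      intro init
      simp [ih, List.append_assoc]
  simp only [sponge_inner]
  simpa [spongeLevel] using h cs []

-- folding a list while ignoring the elements is iteration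
theorem foldl_const_iterate {α β : Type} (f : β → β) (l : List α) (init : β) :
    l.foldl (fun b _ => f b) init = f^[l.length] init := by
  induction l generalizing init with
  | nil => rfl
  | cons a l ih => simp [ih, Function.iterate_succ_apply]

-- snoc characterisation of the n-fold product (last digit varies fastest)
theorem spongeSeqs_succ_snoc (n : Nat) :
    spongeSeqs (n + 1) = (spongeSeqs n).flatMap fun s => spongeOffsets.map (fun o => s ++ [o]) := by
  induction n with
  | zero => decide
  | succ n ih =>
    calc spongeSeqs (n + 2)
        = spongeOffsets.flatMap (fun o => (spongeSeqs (n + 1)).map (o :: ·)) := rfl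
      _ = spongeOffsets.flatMap (fun o =>
            (((spongeSeqs n).flatMap fun s => spongeOffsets.map (fun o2 => s ++ [o2])).map (o :: ·))) := by
            rw [ih]
      _ = (spongeSeqs (n + 1)).flatMap fun s => spongeOffsets.map (fun o => s ++ [o]) := by
            simp [spongeSeqs, List.map_flatMap, List.flatMap_map, List.flatMap_assoc,
              Function.comp_def]

-- n levels of A's subdivision = folding every digit sequence of length n
theorem spongeLevel_iterate (n : Nat) :
    spongeLevel^[n] [((0 : Int), (0 : Int), (0 : Int))]
      = (spongeSeqs n).map fun s => s.foldl spongeStep (0, 0, 0) := by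
  induction n with
  | zero => simp [spongeSeqs]
  | succ n ih =>
    rw [Function.iterate_succ_apply', ih, spongeSeqs_succ_snoc]
    simp [spongeLevel, List.flatMap_map, List.map_flatMap, List.map_map, Function.comp_def,
      List.foldl_append]

-- ===== VERDICT (by name: the statement is the Claim_ definition above) =====
theorem construct_menger_sponge_spec : Claim_equal_construct_menger_sponge := by
  intro iterations _
  unfold Spec_construct_menger_sponge construct_menger_sponge construct_menger_sponge_alt
  have hn : (max iterations 0).toNat = iterations.toNat := by omega
  rw [hn]
  have hr : (PySem.List.pyRange 0 iterations 1).length = iterations.toNat := by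
    rw [PySem.List.length_pyRange_one]; omega
  calc (PySem.List.pyRange 0 iterations 1).foldl
        (fun cubes _it =>
          cubes.foldl
            (fun new_cubes c =>
              mengerTriples27.foldl
                (fun acc d =>
                  if (d.1 = 1 ∧ d.2.1 = 1) ∨ (d.1 = 1 ∧ d.2.2 = 1) ∨ (d.2.1 = 1 ∧ d.2.2 = 1) then
                    acc
                  else acc ++ [(c.1 * 3 + d.1, c.2.1 * 3 + d.2.1, c.2.2 * 3 + d.2.2)])
                new_cubes)
            [])
        [(0, 0, 0)]
      = (PySem.List.pyRange 0 iterations 1).foldl (fun cubes _it => spongeLevel cubes)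
          [(0, 0, 0)] := by
        simp only [sponge_middle]
    _ = spongeLevel^[iterations.toNat] [(0, 0, 0)] := by
        rw [foldl_const_iterate, hr]
    _ = (spongeSeqs iterations.toNat).map (fun s => s.foldl spongeStep (0, 0, 0)) :=
        spongeLevel_iterate _
    _ = (spongeSeqs iterations.toNat).map
          (fun s => s.foldl (fun c d => (c.1 * 3 + d.1, c.2.1 * 3 + d.2.1, c.2.2 * 3 + d.2.2))
            (0, 0, 0)) := rfl
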